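-- pv_equiv track=rewrite | github.com/rwbfd/OpenCompetition | src/nlp/classification/tf1/classification/src/traditional_cls/get_evaluation.py | Label2idx
-- ===== SOURCE A (Python) =====
-- def Label2idx(labels1, labels2):
--     label2idx = {}
--     for i in labels1:
--         if i not in label2idx:
--             label2idx[i] = len(label2idx)
--     for i in labels2:
--         if i not in label2idx:
--             label2idx[i] = len(label2idx)
--     return label2idx
-- ===== SOURCE B (Python) =====
-- def Label2idx(labels1, labels2):
--     combined = list(labels1) + list(labels2)
--     first = {}
--     for i, x in reversed(list(enumerate(combined))):
--         first[x] = i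
--     order = sorted(first.items(), key=lambda kv: kv[1])
--     return {x: rank for rank, (x, _) in enumerate(order)}
-- ===== Notes on version B (the rewrite author's own statement) =====
-- stated objective: alternative
-- what changed: A builds the dict in one forward incremental loop, checking membership and assigning len(dict) at each new label; B instead sweeps the combined list backwards, overwriting a dict so each label ends up mapped to its first-occurrence index, then sorts the (label, index) pairs by index and assigns ranks by enumeration.
import Mathlib
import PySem

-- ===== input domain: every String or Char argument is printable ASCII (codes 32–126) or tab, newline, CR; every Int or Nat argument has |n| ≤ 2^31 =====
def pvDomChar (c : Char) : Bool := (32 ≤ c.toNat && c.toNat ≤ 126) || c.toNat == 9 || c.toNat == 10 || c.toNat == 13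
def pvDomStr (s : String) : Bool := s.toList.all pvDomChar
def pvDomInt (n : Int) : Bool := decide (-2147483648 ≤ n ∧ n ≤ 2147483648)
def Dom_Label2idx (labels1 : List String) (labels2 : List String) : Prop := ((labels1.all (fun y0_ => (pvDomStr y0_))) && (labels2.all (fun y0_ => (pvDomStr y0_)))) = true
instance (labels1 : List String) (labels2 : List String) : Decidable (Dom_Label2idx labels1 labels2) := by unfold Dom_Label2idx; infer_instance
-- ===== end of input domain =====

-- B: instead of A's forward incremental dict (membership check + len(dict) running counter), B sweeps the
-- labels backwards overwriting a dict of first-occurrence indices, then sorts by index and enumerates ranks (alternative; same result).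


-- ===== PORT A =====
-- one loop body: 'if i not in label2idx: label2idx[i] = len(label2idx)'
def Label2idxStep (d : PySem.Dict String Int) (i : String) : PySem.Dict String Int :=
  if d.contains i then d else d.insert i (d.size : Int)

def Label2idx (labels1 : List String) (labels2 : List String) : List (String × Int) :=
  let d := labels1.foldl Label2idxStep PySem.Dict.empty
  let d := labels2.foldl Label2idxStep d
  d.items

-- ===== PORT B =====
-- Source B: backward sweep 'for i, x in reversed(list(enumerate(combined))): first[x] = i',
-- then 'order = sorted(first.items(), key=lambda kv: kv[1])' and '{x: rank for rank, (x, _) in enumerate(order)}'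
def Label2idx_alt (labels1 : List String) (labels2 : List String) : List (String × Int) :=
  let combined := labels1 ++ labels2
  let first := ((PySem.List.enumerate combined 0).reverse).foldl
      (fun d p => d.insert p.2 p.1) PySem.Dict.empty
  let order := PySem.List.sorted first.items (fun kv => kv.2) false
  ((PySem.List.enumerate order 0).foldl (fun d p => d.insert p.2.1 p.1) PySem.Dict.empty).items

-- ===== PRECONDITION & SPEC =====
def Spec_Label2idx (labels1 : List String) (labels2 : List String) (out : List (String × Int)) : Prop := out = Label2idx_alt labels1 labels2
instance (labels1 : List String) (labels2 : List String) (out : List (String × Int)) : Decidable (Spec_Label2idx labels1 labels2 out) := by unfold Spec_Label2idx; infer_instance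

-- ===== CLAIM (what is proved, stated in full; the proofs are below) =====
def Claim_equal_Label2idx : Prop := ∀ (labels1 : List String) (labels2 : List String), Dom_Label2idx labels1 labels2 → Spec_Label2idx labels1 labels2 (Label2idx labels1 labels2)

-- ===== LEMMAS AND PROOFS =====

-- first-occurrence pairs of l not already in `seen`, indexed by COUNTER from n (A's loop result, abstractly)
def pvG (seen : List String) (l : List String) (n : Int) : List (String × Int) :=
  match l with
  | [] => []
  | x :: xs => if x ∈ seen then pvG seen xs n else (x, n) :: pvG (x :: seen) xs (n + 1)

-- first occurrences of l not in `seen`, in order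
def pvDD (seen : List String) (l : List String) : List String :=
  match l with
  | [] => []
  | x :: xs => if x ∈ seen then pvDD seen xs else x :: pvDD (x :: seen) xs

-- indexing a list from n
def pvE (l : List String) (n : Int) : List (String × Int) :=
  match l with
  | [] => []
  | x :: xs => (x, n) :: pvE xs (n + 1)

-- first-occurrence pairs of l not in `seen`, with their POSITION counted from n (B's dict content, abstractly)
def pvH (seen : List String) (l : List String) (n : Int) : List (String × Int) :=
  match l with
  | [] => []
  | x :: xs => if x ∈ seen then pvH seen xs (n + 1) else (x, n) :: pvH (x :: seen) xs (n + 1)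

-- B's backward-overwrite dict over the enumeration of c starting at n
def pvF (c : List String) (n : Int) : PySem.Dict String Int :=
  ((PySem.List.enumerate c n).reverse).foldl (fun d p => d.insert p.2 p.1) PySem.Dict.empty

theorem pvG_congr (l : List String) (s1 s2 : List String) (n : Int)
    (h : ∀ y, y ∈ s1 ↔ y ∈ s2) : pvG s1 l n = pvG s2 l n := by
  induction l generalizing s1 s2 n with
  | nil => rfl
  | cons x xs ih =>
    simp only [pvG]
    by_cases hx : x ∈ s1
    · rw [if_pos hx, if_pos ((h x).1 hx)]; exact ih s1 s2 n h
    · rw [if_neg hx, if_neg (fun hc => hx ((h x).2 hc))]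
      congr 1
      exact ih _ _ _ (by intro y; simp [h y])

theorem pvG_eq_pvE_pvDD (l : List String) (seen : List String) (n : Int) :
    pvG seen l n = pvE (pvDD seen l) n := by
  induction l generalizing seen n with
  | nil => rfl
  | cons x xs ih =>
    simp only [pvG, pvDD]
    by_cases hx : x ∈ seen
    · rw [if_pos hx, if_pos hx]; exact ih seen n
    · rw [if_neg hx, if_neg hx]
      simp only [pvE]
      congr 1
      exact ih _ _

-- membership in the first-occurrence list
theorem mem_pvDD (l : List String) (s : List String) (x : String) :
    x ∈ pvDD s l ↔ x ∈ l ∧ x ∉ s := by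
  induction l generalizing s with
  | nil => simp [pvDD]
  | cons y ys ih =>
    simp only [pvDD, List.mem_cons]
    by_cases hy : y ∈ s
    · rw [if_pos hy, ih]
      constructor
      · rintro ⟨h1, h2⟩; exact ⟨Or.inr h1, h2⟩
      · rintro ⟨rfl | h1, h2⟩
        · exact absurd hy h2
        · exact ⟨h1, h2⟩
    · rw [if_neg hy]
      simp only [List.mem_cons, ih]
      constructor
      · rintro (rfl | ⟨h1, h2⟩)
        · exact ⟨Or.inl rfl, hy⟩
        · push Not at h2
          exact ⟨Or.inr h1, h2.2⟩
      · rintro ⟨rfl | h1, h2⟩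
        · exact Or.inl rfl
        · by_cases hxy : x = y
          · exact Or.inl hxy
          · exact Or.inr ⟨h1, by simp [hxy, h2]⟩

theorem nodup_pvDD (l : List String) (s : List String) : (pvDD s l).Nodup := by
  induction l generalizing s with
  | nil => simp [pvDD]
  | cons y ys ih =>
    simp only [pvDD]
    by_cases hy : y ∈ s
    · rw [if_pos hy]; exact ih s
    · rw [if_neg hy]
      refine List.Nodup.cons ?_ (ih (y :: s))
      intro hc
      exact ((mem_pvDD ys (y :: s) y).mp hc).2 (List.mem_cons_self)

-- pvH projects to pvDD on the labels
theorem map_fst_pvH (l : List String) (s : List String) (n : Int) :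
    (pvH s l n).map Prod.fst = pvDD s l := by
  induction l generalizing s n with
  | nil => rfl
  | cons y ys ih =>
    simp only [pvH, pvDD]
    by_cases hy : y ∈ s
    · rw [if_pos hy, if_pos hy]; exact ih s (n + 1)
    · rw [if_neg hy, if_neg hy]
      simp only [List.map_cons]
      rw [ih (y :: s) (n + 1)]

theorem snd_pvH_ge (l : List String) (s : List String) (n : Int) :
    ∀ p ∈ pvH s l n, n ≤ p.2 := by
  induction l generalizing s n with
  | nil => simp [pvH]
  | cons y ys ih =>
    simp only [pvH]
    by_cases hy : y ∈ s
    · rw [if_pos hy]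
      intro p hp
      exact le_trans (by omega) (ih s (n + 1) p hp)
    · rw [if_neg hy]
      intro p hp
      rcases List.mem_cons.mp hp with rfl | hp'
      · exact le_refl n
      · exact le_trans (by omega) (ih (y :: s) (n + 1) p hp')

theorem pairwise_pvH (l : List String) (s : List String) (n : Int) :
    (pvH s l n).Pairwise (fun a b => a.2 < b.2) := by
  induction l generalizing s n with
  | nil => simp [pvH]
  | cons y ys ih =>
    simp only [pvH]
    by_cases hy : y ∈ s
    · rw [if_pos hy]; exact ih s (n + 1)
    · rw [if_neg hy]
      refine List.Pairwise.cons ?_ (ih (y :: s) (n + 1))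
      intro p hp
      have := snd_pvH_ge ys (y :: s) (n + 1) p hp
      omega

-- the backward-overwrite loop peels off its LAST step (the head of the enumeration)
theorem pvF_cons (y : String) (ys : List String) (n : Int) :
    pvF (y :: ys) n = (pvF ys (n + 1)).insert y n := by
  simp only [pvF, PySem.List.enumerate_cons, List.reverse_cons, List.foldl_append, List.foldl_cons,
    List.foldl_nil]

theorem nodup_keys_pvF (c : List String) (n : Int) : (pvF c n).keys.Nodup := by
  induction c generalizing n with
  | nil => exact PySem.Dict.nodup_keys_empty
  | cons y ys ih => rw [pvF_cons]; exact PySem.Dict.nodup_keys_insert _ _ _ (ih (n + 1))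

-- the dict after the backward sweep holds exactly the first-occurrence pairs
theorem mem_pvH_iff_get?_pvF (c : List String) :
    ∀ (s : List String) (n : Int) (x : String) (v : Int),
    (x, v) ∈ pvH s c n ↔ x ∉ s ∧ (pvF c n).get? x = some v := by
  induction c with
  | nil =>
    intro s n x v
    simp [pvH, pvF, PySem.List.enumerate_nil, PySem.Dict.get?_empty]
  | cons y ys ih =>
    intro s n x v
    rw [pvF_cons]
    simp only [pvH]
    by_cases hy : y ∈ s
    · rw [if_pos hy]
      by_cases hxy : x = y
      · subst hxy
        rw [PySem.Dict.get?_insert_self]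
        constructor
        · intro hc
          exact absurd hy (((ih s (n + 1) x v).mp hc).1)
        · rintro ⟨h1, _⟩; exact absurd hy h1
      · rw [PySem.Dict.get?_insert_of_ne _ _ hxy]
        exact ih s (n + 1) x v
    · rw [if_neg hy]
      by_cases hxy : x = y
      · subst hxy
        rw [PySem.Dict.get?_insert_self]
        simp only [List.mem_cons]
        constructor
        · rintro (heq | hc)
          · exact ⟨hy, by rw [(Prod.mk.injEq _ _ _ _).mp heq |>.2]⟩
          · exact absurd List.mem_cons_self (((ih (x :: s) (n + 1) x v).mp hc).1)
        · rintro ⟨_, h2⟩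
          exact Or.inl (by simpa using h2.symm)
      · rw [PySem.Dict.get?_insert_of_ne _ _ hxy]
        simp only [List.mem_cons]
        rw [ih (y :: s) (n + 1) x v]
        constructor
        · rintro (heq | ⟨h1, h2⟩)
          · exact absurd ((Prod.mk.injEq _ _ _ _).mp heq).1 hxy
          · exact ⟨fun hc => h1 (List.mem_cons.mpr (Or.inr hc)), h2⟩
        · rintro ⟨h1, h2⟩
          exact Or.inr ⟨by simp [hxy, h1], h2⟩

theorem items_pvF_perm_pvH (c : List String) (n : Int) :
    (pvF c n).items.Perm (pvH [] c n) := by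
  have hk := nodup_keys_pvF c n
  have hnd1 : (pvF c n).items.Nodup := List.Nodup.of_map Prod.fst hk
  have hnd2 : (pvH [] c n).Nodup := by
    have := nodup_pvDD c []
    rw [← map_fst_pvH c [] n] at this
    exact List.Nodup.of_map Prod.fst this
  rw [List.perm_ext_iff_of_nodup hnd1 hnd2]
  rintro ⟨x, v⟩
  rw [mem_pvH_iff_get?_pvF c [] n x v]
  constructor
  · intro hm
    exact ⟨by simp, PySem.Dict.get?_of_mem_items _ hm hk⟩
  · rintro ⟨_, h⟩
    exact PySem.Dict.mem_items_of_get?_eq_some _ h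

-- sorting the dict items by stored index recovers first-appearance order
theorem sorted_items_pvF (c : List String) (n : Int) :
    PySem.List.sorted (pvF c n).items (fun kv => kv.2) false = pvH [] c n :=
  PySem.List.sorted_eq_of_perm_of_pairwise_lt _ _ _ (items_pvF_perm_pvH c n).symm
    (pairwise_pvH c [] n)

-- the final rank-assigning fold turns any pair list with distinct labels into label ↦ rank
theorem rank_fold_items (t : List (String × Int)) (m : Int) (hnd : (t.map Prod.fst).Nodup) :
    ((PySem.List.enumerate t m).foldl (fun d p => d.insert p.2.1 p.1) PySem.Dict.empty).items
      = pvE (t.map Prod.fst) m := by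
  have h := PySem.Dict.items_foldl_insert_fresh
      (l := PySem.List.enumerate t m)
      (k := fun (p : Int × (String × Int)) => p.2.1) (v := fun p => p.1)
      (d := PySem.Dict.empty)
      (by intro a _; exact PySem.Dict.contains_empty _)
      (by
        have : (PySem.List.enumerate t m).map (fun p => p.2.1)
            = ((PySem.List.enumerate t m).map (·.2)).map Prod.fst := by
          rw [List.map_map]; rfl
        rw [this, PySem.List.map_snd_enumerate]
        exact hnd)
  rw [h]
  simp only [PySem.Dict.empty, List.nil_append]
  clear h hnd
  induction t generalizing m with
  | nil => simp [PySem.List.enumerate_nil, pvE]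
  | cons p ps ih =>
    simp only [PySem.List.enumerate_cons, List.map_cons, pvE, ih]

-- A's loop from any well-formed dict state appends exactly pvG of the remaining labels
theorem foldl_step_items (l : List String) (d : PySem.Dict String Int)
    (hnd : d.keys.Nodup) :
    (l.foldl Label2idxStep d).items = d.items ++ pvG d.keys l (d.size : Int) := by
  induction l generalizing d with
  | nil => simp [pvG]
  | cons x xs ih =>
    simp only [List.foldl_cons, Label2idxStep, pvG]
    by_cases hc : d.contains x = true
    · rw [if_pos hc, if_pos ((PySem.Dict.contains_iff_mem_keys d x).mp hc)]
      exact ih d hnd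
    · have hc' : d.contains x = false := by simpa using hc
      have hxk : x ∉ d.keys := fun hm => by
        simp [(PySem.Dict.contains_iff_mem_keys d x).mpr hm] at hc
      rw [if_neg hc, if_neg hxk]
      have hkeys : (d.insert x (d.size : Int)).keys = d.keys ++ [x] :=
        PySem.Dict.keys_insert_of_not_contains d _ hc'
      have hnd' : (d.insert x (d.size : Int)).keys.Nodup := by
        rw [hkeys]
        exact List.Nodup.append hnd (List.nodup_singleton x) (List.disjoint_singleton.mpr hxk)
      rw [ih _ hnd']
      rw [PySem.Dict.items_insert_of_not_contains d _ hc', hkeys]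
      have hsz : ((d.insert x (d.size : Int)).size : Int) = (d.size : Int) + 1 := by
        have : (d.insert x (d.size : Int)).size = d.size + 1 := by
          rw [PySem.Dict.size_insert, if_neg (by simp [hc'])]
        rw [this]; push_cast; ring
      rw [hsz, pvG_congr xs (d.keys ++ [x]) (x :: d.keys) _ (by intro y; simp; tauto)]
      simp

-- ===== VERDICT (by name: the statement is the Claim_ definition above) =====
theorem Label2idx_spec : Claim_equal_Label2idx := by
  intro labels1 labels2 _
  show (labels2.foldl Label2idxStep (labels1.foldl Label2idxStep PySem.Dict.empty)).items = _
  rw [← List.foldl_append]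
  rw [foldl_step_items _ _ (by simp [PySem.Dict.keys, PySem.Dict.empty])]
  have hB : Label2idx_alt labels1 labels2 = pvE (pvDD [] (labels1 ++ labels2)) 0 := by
    show ((PySem.List.enumerate
        (PySem.List.sorted (pvF (labels1 ++ labels2) 0).items (fun kv => kv.2) false) 0).foldl
        (fun d p => d.insert p.2.1 p.1) PySem.Dict.empty).items = _
    rw [sorted_items_pvF, rank_fold_items _ _ (by
      rw [map_fst_pvH]; exact nodup_pvDD (labels1 ++ labels2) []), map_fst_pvH]
  rw [hB, pvG_eq_pvE_pvDD]
  simp [PySem.Dict.empty, PySem.Dict.keys, PySem.Dict.size]
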